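-- pv_equiv track=rewrite | github.com/Yawn-Sean/Daily_CF_Problems | daily_problems/2025/12/1227/personal_submission/cf105262g_liryc.py | solve
-- ===== SOURCE A (Python) =====
-- def manacher(v, ra):
--     n, p = len(v), 0
--     for i in range(1, n - 1):
--         if p + ra[p] > i:
--             ra[i] = min(p + ra[p] - i, ra[p - (i - p)])
--         while v[i + ra[i]] == v[i - ra[i]]:
--             ra[i] += 1
--         if i + ra[i] > p + ra[p]:
--             p = i
--
-- def solve(n: int, a: list[int]) -> int:
--     MOD = 10**9 + 7
--     v = [0] * (2 * n + 1)
--     v[0] = -2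
--     v[2 * n] = -1
--
--     for i in range(n):
--         v[2 * i + 1] = a[i]
--     n = 2 * n + 1
--
--     ra = [0] * n
--     manacher(v, ra)
--
--     pre = [0] * (n + 2)
--     for i in range(1, n - 1):
--         ra[i] -= ra[i] & 1 ^ (1 if v[i] else 0)
--
--         pre[i - ra[i]] += 1
--         pre[i + 1] -= 2
--         pre[i + ra[i] + 2] += 1
--
--     for i in range(1, n):
--         pre[i] += pre[i - 1]
--     for i in range(1, n):
--         pre[i] += pre[i - 1]
--
--     for i in range(n):
--         pre[i] >>= 1
--
--     ans = 0
--     for i in range(1, n - 1):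
--         ans = (ans + pre[i] * v[i]) % MOD
--
--     return ans
-- ===== SOURCE B (Python) =====
-- def solve(n: int, a: list[int]) -> int:
--     MOD = 10**9 + 7
--     v = [-2] + [x for i in range(n) for x in (a[i], 0)]
--     v[2 * n] = -1
--     m = 2 * n + 1
--
--     def radius(i):
--         r = 0
--         while v[i + r] == v[i - r]:
--             r += 1
--         return r - ((r & 1) ^ (1 if v[i] else 0))
--
--     rad = [radius(i) if 0 < i < m - 1 else 0 for i in range(m)]
--
--     d = [0] * (m + 2)
--     for i in range(1, m - 1):
--         d[i - rad[i]] += 1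
--         d[i + 1] -= 2
--         d[i + rad[i] + 2] += 1
--
--     p1 = []
--     s = 0
--     for x in d[:m]:
--         s += x
--         p1.append(s)
--     p2 = []
--     s = 0
--     for x in p1:
--         s += x
--         p2.append(s)
--
--     return sum((p2[i] >> 1) * v[i] for i in range(1, m - 1)) % MOD
-- ===== Notes on version B (the rewrite author's own statement) =====
-- stated objective: simpler
-- what changed: Manacher's mirror/skip radius computation is replaced by an independent expand-around-center helper per center with the parity adjustment folded in; the transformed array is built by a comprehension instead of index assignments into a zero array, the two prefix-sum passes build fresh running-sum lists instead of updating the difference array in place, and the halving and modulus are folded into one final sum instead of separate passes.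
import Mathlib
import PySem

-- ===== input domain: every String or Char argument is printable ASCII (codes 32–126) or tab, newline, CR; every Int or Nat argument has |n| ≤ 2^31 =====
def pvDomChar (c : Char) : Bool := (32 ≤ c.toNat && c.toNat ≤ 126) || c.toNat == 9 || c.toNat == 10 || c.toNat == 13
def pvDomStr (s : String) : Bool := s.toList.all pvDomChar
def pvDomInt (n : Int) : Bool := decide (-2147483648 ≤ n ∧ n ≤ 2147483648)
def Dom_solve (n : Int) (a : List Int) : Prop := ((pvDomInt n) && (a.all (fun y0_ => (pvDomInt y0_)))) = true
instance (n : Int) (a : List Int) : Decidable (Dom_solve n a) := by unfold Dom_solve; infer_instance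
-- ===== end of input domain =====

-- B replaces Manacher's mirror/skip radius computation by a plain expand-around-center helper
-- computed independently per center, builds the transformed array by a comprehension, folds the
-- parity adjustment into the radius helper, takes the prefix sums functionally into fresh lists
-- instead of in place, and folds the halving and the modulus into one final sum (simpler).

-- ===== PORT A =====

-- Option equality used by the `while v[i+ra[i]] == v[i-ra[i]]` test; `none` (IndexError in
-- Python) stops the loop — on inputs satisfying Pre_ the indices never leave the list.
def pvEqOpt (x y : Option Int) : Bool :=
  match x, y with
  | some u, some w => u == w
  | _, _ => false

-- the literal `while` loop of manacher: expand radius r while the mirrored entries match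
-- (fuel-bounded; fuel v.length + 1 is never exhausted on inputs satisfying Pre_)
def pvExpand (v : List Int) (i : Int) : Nat → Int → Int
  | 0, r => r
  | f + 1, r =>
    if pvEqOpt (PySem.List.pyGet? v (i + r)) (PySem.List.pyGet? v (i - r)) then
      pvExpand v i f (r + 1)
    else r

-- v = [0]*(2n+1); v[0] = -2; v[2n] = -1; for i in range(n): v[2i+1] = a[i]
def pvBuildV (n : Int) (a : List Int) : List Int :=
  let v := List.replicate (2 * n + 1).toNat (0 : Int)
  let v := PySem.List.pySetD v 0 (-2)
  let v := PySem.List.pySetD v (2 * n) (-1)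
  (PySem.List.pyRange 0 n 1).foldl
    (fun v i => PySem.List.pySetD v (2 * i + 1) (PySem.List.pyGetD a i 0)) v

-- one iteration of manacher's loop body (state: (ra, p))
def pvAStep (v : List Int) (st : List Int × Int) (i : Int) : List Int × Int :=
  let ra := st.1
  let p := st.2
  let ra :=
    if p + PySem.List.pyGetD ra p 0 > i then
      PySem.List.pySetD ra i
        (min (p + PySem.List.pyGetD ra p 0 - i) (PySem.List.pyGetD ra (p - (i - p)) 0))
    else ra
  let ra := PySem.List.pySetD ra i (pvExpand v i (v.length + 1) (PySem.List.pyGetD ra i 0))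
  let p := if i + PySem.List.pyGetD ra i 0 > p + PySem.List.pyGetD ra p 0 then i else p
  (ra, p)

-- def manacher(v, ra): mirror initialisation + expansion + rightmost-palindrome tracking
def pvManacher (v : List Int) : List Int :=
  let N : Int := PySem.List.len v
  ((PySem.List.pyRange 1 (N - 1) 1).foldl (pvAStep v)
    (List.replicate v.length (0 : Int), 0)).1

-- A's tail: in-place difference-array accumulation with the in-place ra adjustment, two
-- in-place prefix-sum passes, an in-place halving pass, and the mod-at-every-step sum
def pvPost (v ra0 : List Int) : Int :=
  let MOD : Int := 1000000007
  let N : Int := PySem.List.len v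
  let st := (PySem.List.pyRange 1 (N - 1) 1).foldl
    (fun (st : List Int × List Int) i =>
      let ra := st.1
      let pre := st.2
      let r := PySem.List.pyGetD ra i 0 -
        PySem.Int.bxor (PySem.Int.band (PySem.List.pyGetD ra i 0) 1)
          (if PySem.List.pyGetD v i 0 ≠ 0 then 1 else 0)
      let ra := PySem.List.pySetD ra i r
      let pre := PySem.List.pySetD pre (i - r) (PySem.List.pyGetD pre (i - r) 0 + 1)
      let pre := PySem.List.pySetD pre (i + 1) (PySem.List.pyGetD pre (i + 1) 0 - 2)
      let pre := PySem.List.pySetD pre (i + r + 2) (PySem.List.pyGetD pre (i + r + 2) 0 + 1)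
      (ra, pre))
    (ra0, List.replicate (N + 2).toNat (0 : Int))
  let pre := st.2
  let pre := (PySem.List.pyRange 1 N 1).foldl
    (fun pre i => PySem.List.pySetD pre i
      (PySem.List.pyGetD pre i 0 + PySem.List.pyGetD pre (i - 1) 0)) pre
  let pre := (PySem.List.pyRange 1 N 1).foldl
    (fun pre i => PySem.List.pySetD pre i
      (PySem.List.pyGetD pre i 0 + PySem.List.pyGetD pre (i - 1) 0)) pre
  let pre := (PySem.List.pyRange 0 N 1).foldl
    (fun pre i => PySem.List.pySetD pre i ((PySem.List.pyGetD pre i 0 : Int) >>> (1:Nat))) pre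
  (PySem.List.pyRange 1 (N - 1) 1).foldl
    (fun ans i => PySem.Int.mod
      (ans + PySem.List.pyGetD pre i 0 * PySem.List.pyGetD v i 0) MOD) 0

def solve (n : Int) (a : List Int) : Int :=
  let v := pvBuildV n a
  pvPost v (pvManacher v)

-- ===== PORT B =====

-- r = 0; while v[i+r] == v[i-r]: r += 1   (B's own while loop, inside `radius`)
def pvGrow (v : List Int) (i : Int) : Nat → Int → Int
  | 0, r => r
  | f + 1, r =>
    if pvEqOpt (PySem.List.pyGet? v (i + r)) (PySem.List.pyGet? v (i - r)) then
      pvGrow v i f (r + 1)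
    else r

-- def radius(i): expand, then return r - ((r & 1) ^ (1 if v[i] else 0))
def pvRadius (v : List Int) (i : Int) : Int :=
  let r := pvGrow v i (v.length + 1) 0
  r - PySem.Int.bxor (PySem.Int.band r 1) (if PySem.List.pyGetD v i 0 ≠ 0 then 1 else 0)

-- v = [-2] + [x for i in range(n) for x in (a[i], 0)]; v[2*n] = -1
def pvVB (n : Int) (a : List Int) : List Int :=
  let v := -2 :: (PySem.List.pyRange 0 n 1).flatMap (fun i => [PySem.List.pyGetD a i 0, 0])
  PySem.List.pySetD v (2 * n) (-1)

-- rad = [radius(i) if 0 < i < m - 1 else 0 for i in range(m)]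
def pvRad (v : List Int) : List Int :=
  let m : Int := PySem.List.len v
  (PySem.List.pyRange 0 m 1).map (fun i => if 0 < i ∧ i < m - 1 then pvRadius v i else 0)

-- d = [0]*(m+2); for i in range(1, m-1): d[i-rad[i]] += 1; d[i+1] -= 2; d[i+rad[i]+2] += 1
def pvDiff (m : Int) (rad : List Int) : List Int :=
  (PySem.List.pyRange 1 (m - 1) 1).foldl
    (fun d i =>
      let r := PySem.List.pyGetD rad i 0
      let d := PySem.List.pySetD d (i - r) (PySem.List.pyGetD d (i - r) 0 + 1)
      let d := PySem.List.pySetD d (i + 1) (PySem.List.pyGetD d (i + 1) 0 - 2)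
      PySem.List.pySetD d (i + r + 2) (PySem.List.pyGetD d (i + r + 2) 0 + 1))
    (List.replicate (m + 2).toNat (0 : Int))

-- p = []; s = 0; for x in xs: s += x; p.append(s)
def pvCums (xs : List Int) : List Int :=
  (xs.foldl (fun (st : List Int × Int) x => (st.1 ++ [st.2 + x], st.2 + x)) ([], 0)).1

def solve_alt (n : Int) (a : List Int) : Int :=
  let v := pvVB n a
  let m : Int := PySem.List.len v
  let rad := pvRad v
  let d := pvDiff m rad
  let p1 := pvCums (PySem.List.slice d none (some m))
  let p2 := pvCums p1
  PySem.Int.mod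
    (((PySem.List.pyRange 1 (m - 1) 1).map
      (fun i => (PySem.List.pyGetD p2 i 0 >>> (1:Nat)) * PySem.List.pyGetD v i 0)).sum)
    1000000007

-- ===== PRECONDITION & SPEC =====
-- A raises IndexError when n < 0 (v is empty) or when n > len(a) (reading a[i]); Pre_ excludes
-- exactly those inputs.
def Pre_solve (n : Int) (a : List Int) : Prop := 0 ≤ n ∧ n ≤ a.length
instance (n : Int) (a : List Int) : Decidable (Pre_solve n a) := by unfold Pre_solve; infer_instance

def pvWitness_solve : Int × List Int := (3, [1, 2, 1])

def Spec_solve (n : Int) (a : List Int) (out : Int) : Prop := out = solve_alt n a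
instance (n : Int) (a : List Int) (out : Int) : Decidable (Spec_solve n a out) := by unfold Spec_solve; infer_instance

-- ===== CLAIM (what is proved, stated in full; the proofs are below) =====
def Claim_equal_solve : Prop := ∀ (n : Int) (a : List Int), Dom_solve n a → Pre_solve n a → Spec_solve n a (solve n a)

-- ===== LEMMAS AND PROOFS =====

theorem pvEqOpt_true_iff (x y : Option Int) : pvEqOpt x y = true ↔ ∃ u, x = some u ∧ y = some u := by
  cases x with
  | none => simp [pvEqOpt]
  | some u =>
    cases y with
    | none => simp [pvEqOpt]
    | some w =>
      constructor
      · intro h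
        have huw : u = w := by simpa [pvEqOpt] using h
        exact ⟨u, rfl, by rw [huw]⟩
      · rintro ⟨z, hz1, hz2⟩
        cases hz1; cases hz2; simp [pvEqOpt]

def pvMatch (v : List Int) (i : Int) (k : Nat) : Bool :=
  pvEqOpt (PySem.List.pyGet? v (i + (k : Int))) (PySem.List.pyGet? v (i - (k : Int)))

theorem pvEqOpt_none_left (y : Option Int) : pvEqOpt none y = false := by cases y <;> rfl

theorem pvMismatch_exists (v : List Int) (i : Int) (hi : 1 ≤ i) :
    ∃ k : Nat, pvMatch v i k = false := by
  refine ⟨v.length, ?_⟩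
  have h : PySem.List.pyGet? v (i + (v.length : Int)) = none := by
    rw [PySem.List.pyGet?_eq_none_iff]
    intro ⟨_, h2⟩; omega
  rw [pvMatch, h, pvEqOpt_none_left]

noncomputable def pvK (v : List Int) (i : Int) : Nat :=
  @dite _ (∃ k : Nat, pvMatch v i k = false) (Classical.propDecidable _)
    (fun h => Nat.find h) (fun _ => 0)

theorem pvK_mismatch (v : List Int) (i : Int) (hi : 1 ≤ i) : pvMatch v i (pvK v i) = false := by
  have h := pvMismatch_exists v i hi
  rw [pvK, dif_pos h]
  exact Nat.find_spec h

theorem pvK_match (v : List Int) (i : Int) (hi : 1 ≤ i) {k : Nat} (hk : k < pvK v i) :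
    pvMatch v i k = true := by
  have h := pvMismatch_exists v i hi
  rw [pvK, dif_pos h] at hk
  have := Nat.find_min h hk
  simpa using this

theorem pvK_le (v : List Int) (i : Int) {k : Nat} (h : pvMatch v i k = false) :
    pvK v i ≤ k := by
  have he : ∃ k : Nat, pvMatch v i k = false := ⟨k, h⟩
  rw [pvK, dif_pos he]
  exact Nat.find_le h

theorem pvK_le_len (v : List Int) (i : Int) (hi : 1 ≤ i) : pvK v i ≤ v.length := by
  refine pvK_le v i ?_
  have h : PySem.List.pyGet? v (i + (v.length : Int)) = none := by
    rw [PySem.List.pyGet?_eq_none_iff]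
    intro ⟨_, h2⟩; omega
  rw [pvMatch, h, pvEqOpt_none_left]

theorem pvExpand_eq (v : List Int) (i : Int) (hi : 1 ≤ i) :
    ∀ (f r : Nat), (∀ k < r, pvMatch v i k = true) → pvK v i < r + f →
      pvExpand v i f (r : Int) = (pvK v i : Int) := by
  intro f
  induction f with
  | zero =>
    intro r hm hf
    have := hm _ hf
    rw [pvK_mismatch v i hi] at this
    exact absurd this (by simp)
  | succ f ih =>
    intro r hm hf
    rw [pvExpand]
    by_cases h : pvMatch v i r = true
    · rw [if_pos (by simpa [pvMatch] using h)]
      have hc : ((r : Int) + 1) = ((r + 1 : Nat) : Int) := by push_cast; ring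
      rw [hc]
      refine ih (r + 1) ?_ (by omega)
      intro k hk
      rcases Nat.lt_succ_iff_lt_or_eq.mp hk with h' | rfl
      · exact hm _ h'
      · exact h
    · rw [if_neg (by simpa [pvMatch] using h)]
      have h1 : pvK v i ≤ r := pvK_le v i (by simpa using h)
      have h2 : r ≤ pvK v i := by
        by_contra hc
        have hx := hm _ (by omega : pvK v i < r)
        rw [pvK_mismatch v i hi] at hx
        exact absurd hx (by simp)
      omega

theorem pvGrow_eq_pvExpand (v : List Int) (i : Int) :
    ∀ (f : Nat) (r : Int), pvGrow v i f r = pvExpand v i f r := by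
  intro f
  induction f with
  | zero => intro r; rfl
  | succ f ih =>
    intro r
    rw [pvGrow, pvExpand]
    split_ifs with h
    · exact ih (r + 1)
    · rfl

theorem pvGrow_zero_eq_pvK (v : List Int) (i : Int) (hi : 1 ≤ i) :
    pvGrow v i (v.length + 1) 0 = (pvK v i : Int) := by
  rw [pvGrow_eq_pvExpand]
  have h := pvExpand_eq v i hi (v.length + 1) 0 (by omega)
    (by have := pvK_le_len v i hi; omega)
  simpa using h

-- mirror/symmetry: inside the palindrome around p, matches transfer from 2p-i to i
theorem pvMirror (v : List Int) (p i : Int) (hp : 1 ≤ p) (hpi : p < i)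
    (hgap : i - p < (pvK v p : Int)) (hKp : (pvK v p : Int) ≤ p) (k : Nat)
    (hk1 : (k : Int) < p + (pvK v p : Int) - i) (hk2 : k < pvK v (2 * p - i)) :
    pvMatch v i k = true := by
  have m1 : pvMatch v p ((i - p).toNat + k) = true :=
    pvK_match v p hp (by omega)
  rw [pvMatch, pvEqOpt_true_iff] at m1
  obtain ⟨u, hu1, hu2⟩ := m1
  have e1 : p + (((i - p).toNat + k : Nat) : Int) = i + k := by omega
  have e2 : p - (((i - p).toNat + k : Nat) : Int) = 2 * p - i - k := by omega
  rw [e1] at hu1; rw [e2] at hu2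
  have m3 : pvMatch v (2 * p - i) k = true := pvK_match v (2 * p - i) (by omega) hk2
  rw [pvMatch, pvEqOpt_true_iff] at m3
  obtain ⟨w, hw1, hw2⟩ := m3
  have hwu : w = u := by rw [hu2] at hw2; exact (Option.some_inj.mp hw2).symm
  by_cases hcase : (k : Int) ≤ i - p
  · have m2 : pvMatch v p ((i - p - k).toNat) = true := pvK_match v p hp (by omega)
    rw [pvMatch, pvEqOpt_true_iff] at m2
    obtain ⟨x, hx1, hx2⟩ := m2
    have f1 : p + (((i - p - k).toNat : Nat) : Int) = i - k := by omega
    have f2 : p - (((i - p - k).toNat : Nat) : Int) = 2 * p - i + k := by omega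
    rw [f1] at hx1; rw [f2] at hx2
    have hxw : x = w := by rw [hw1] at hx2; exact (Option.some_inj.mp hx2).symm
    rw [pvMatch, pvEqOpt_true_iff]
    exact ⟨u, hu1, by rw [hx1, hxw, hwu]⟩
  · have m2 : pvMatch v p ((p + k - i).toNat) = true := pvK_match v p hp (by omega)
    rw [pvMatch, pvEqOpt_true_iff] at m2
    obtain ⟨x, hx1, hx2⟩ := m2
    have f1 : p + (((p + k - i).toNat : Nat) : Int) = 2 * p - i + k := by omega
    have f2 : p - (((p + k - i).toNat : Nat) : Int) = i - k := by omega
    rw [f1] at hx1; rw [f2] at hx2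
    have hxw : x = w := by rw [hw1] at hx1; exact (Option.some_inj.mp hx1).symm
    rw [pvMatch, pvEqOpt_true_iff]
    exact ⟨u, hu1, by rw [hx2, hxw, hwu]⟩

theorem pvGetD_set_self (xs : List Int) (m : Nat) (w : Int) (h : m < xs.length) :
    (xs.set m w).getD m 0 = w := by
  simp [List.getD_eq_getElem?_getD, h]

theorem pvGetD_set_ne (xs : List Int) (m j : Nat) (w : Int) (h : m ≠ j) :
    (xs.set m w).getD j 0 = xs.getD j 0 := by
  simp [List.getD_eq_getElem?_getD, h]

theorem pvFoldSet_length (g h : Int → Int) (l : List Int) (w : List Int) :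
    (l.foldl (fun v i => PySem.List.pySetD v (g i) (h i)) w).length = w.length := by
  induction l generalizing w with
  | nil => rfl
  | cons x xs ih => simp [List.foldl_cons, ih, PySem.List.length_pySetD]

theorem pvBuildV_length (n : Int) (a : List Int) :
    (pvBuildV n a).length = (2 * n + 1).toNat := by
  rw [pvBuildV]
  rw [pvFoldSet_length (fun i => 2 * i + 1) (fun i => PySem.List.pyGetD a i 0)]
  simp [PySem.List.length_pySetD]

theorem pvFoldSet_odd_getD (h : Int → Int) (l : List Int) (hl : ∀ x ∈ l, 0 ≤ x)
    (w : List Int) (j : Nat) (hj : j % 2 = 0) :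
    (l.foldl (fun v i => PySem.List.pySetD v (2 * i + 1) (h i)) w).getD j 0 = w.getD j 0 := by
  induction l generalizing w with
  | nil => rfl
  | cons x xs ih =>
    have hx : 0 ≤ x := hl x (by simp)
    rw [List.foldl_cons, ih (fun y hy => hl y (by simp [hy]))]
    rw [PySem.List.pySetD_of_nonneg _ _ (by omega : (0:Int) ≤ 2 * x + 1)]
    exact pvGetD_set_ne _ _ _ _ (by omega)

theorem pvBuildV_even (n : Int) (a : List Int) (hn : 1 ≤ n) (j : Nat) (hj2 : j % 2 = 0) :
    (pvBuildV n a).getD j 0 = if j = 0 then -2 else if (j : Int) = 2 * n then -1 else 0 := by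
  rw [pvBuildV]
  rw [pvFoldSet_odd_getD (fun i => PySem.List.pyGetD a i 0) _
    (fun x hx => ((PySem.List.mem_pyRange_one).mp hx).1) _ j hj2]
  rw [PySem.List.pySetD_of_nonneg _ _ (by omega : (0:Int) ≤ 0)]
  rw [PySem.List.pySetD_of_nonneg _ _ (by omega : (0:Int) ≤ 2 * n)]
  simp only [Int.toNat_zero]
  by_cases h0 : j = 0
  · subst h0
    rw [pvGetD_set_ne _ _ _ _ (by omega)]
    rw [pvGetD_set_self _ _ _ (by simp; omega)]
    simp
  · by_cases h2n : (j : Int) = 2 * n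
    · rw [(by omega : (2 * n).toNat = j)]
      rw [pvGetD_set_self _ _ _ (by simp [List.length_set]; omega)]
      simp [h0, h2n]
    · rw [pvGetD_set_ne _ _ _ _ (by omega)]
      rw [pvGetD_set_ne _ _ _ _ (by omega)]
      simp [h0, h2n, List.getD_eq_getElem?_getD, List.getElem?_replicate]
      split <;> rfl

theorem pvFoldSet_odd_self (g : Int → Int) (u : Int) (hu : 0 ≤ u) (w : List Int)
    (i0 : Nat) (hlt : (i0 : Int) < u) (hw : 2 * i0 + 1 < w.length) :
    ((PySem.List.pyRange 0 u 1).foldl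
      (fun v i => PySem.List.pySetD v (2 * i + 1) (g i)) w).getD (2 * i0 + 1) 0
      = g i0 := by
  induction u, hu using Int.le_induction with
  | base => omega
  | succ m hm ih =>
    rw [PySem.List.pyRange_one_succ_right (by omega), List.foldl_append, List.foldl_cons,
      List.foldl_nil]
    rw [PySem.List.pySetD_of_nonneg _ _ (by omega : (0:Int) ≤ 2 * m + 1)]
    by_cases hc : (i0 : Int) = m
    · have hidx : (2 * m + 1).toNat = 2 * i0 + 1 := by omega
      rw [hidx]
      rw [pvGetD_set_self]
      · congr 1; omega
      · rw [pvFoldSet_length (fun i => 2 * i + 1) g]; exact hw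
    · rw [pvGetD_set_ne _ _ _ _ (by omega)]
      exact ih (by omega)

theorem pvBuildV_odd (n : Int) (a : List Int) (hn : 0 ≤ n) (i0 : Nat)
    (hi0 : (i0 : Int) < n) :
    (pvBuildV n a).getD (2 * i0 + 1) 0 = PySem.List.pyGetD a (i0 : Int) 0 := by
  rw [pvBuildV]
  exact pvFoldSet_odd_self (fun i => PySem.List.pyGetD a i 0) n hn _ i0 hi0
    (by simp [PySem.List.length_pySetD]; omega)

theorem pvK_le_self (n : Int) (a : List Int) (hn : 1 ≤ n) (i : Int)
    (h1 : 1 ≤ i) (_h2 : i ≤ 2 * n - 1) :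
    (pvK (pvBuildV n a) i : Int) ≤ i := by
  have hlen : (pvBuildV n a).length = (2 * n + 1).toNat := pvBuildV_length n a
  have hm : pvMatch (pvBuildV n a) i i.toNat = false := by
    rw [pvMatch]
    have hz : i - (i.toNat : Int) = 0 := by omega
    rw [hz]
    have h0 : PySem.List.pyGet? (pvBuildV n a) 0 = some (-2) := by
      rw [PySem.List.pyGet?_eq_some_getElem (pvBuildV n a) (by omega) (by omega)]
      rw [← List.getD_eq_getElem _ 0 (by omega)]
      simp only [Int.toNat_zero]
      rw [pvBuildV_even n a hn 0 (by omega)]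
      simp
    rw [h0]
    by_cases hbig : (2 * n + 1 : Int) ≤ i + (i.toNat : Int)
    · have : PySem.List.pyGet? (pvBuildV n a) (i + (i.toNat : Int)) = none := by
        rw [PySem.List.pyGet?_eq_none_iff]
        intro ⟨_, hlt⟩; omega
      rw [this, pvEqOpt_none_left]
    · have hrange : i + (i.toNat : Int) < ((pvBuildV n a).length : Int) := by omega
      rw [PySem.List.pyGet?_eq_some_getElem (pvBuildV n a) (by omega) hrange]
      rw [← List.getD_eq_getElem _ 0 (by omega)]
      rw [pvBuildV_even n a hn _ (by omega)]
      have hne0 : (i + (i.toNat : Int)).toNat ≠ 0 := by omega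
      rw [if_neg hne0]
      by_cases hmid : ((i + (i.toNat : Int)).toNat : Int) = 2 * n
      · rw [if_pos hmid]; rfl
      · rw [if_neg hmid]; rfl
  have hle := pvK_le (pvBuildV n a) i hm
  omega

theorem pvAStep_key (v : List Int)
    (hsent : ∀ jj : Int, 1 ≤ jj → jj ≤ (v.length : Int) - 2 → (pvK v jj : Int) ≤ jj)
    (u : Int) (st : List Int × Int)
    (hu1 : 1 ≤ u) (hu2 : u ≤ (v.length : Int) - 2)
    (hlen : st.1.length = v.length)
    (hent : ∀ j : Nat, st.1.getD j 0 =
      if 1 ≤ (j : Int) ∧ (j : Int) < u then (pvK v (j : Int) : Int) else 0)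
    (hp : st.2 = 0 ∨ (1 ≤ st.2 ∧ st.2 < u)) :
    (pvAStep v st u).1 = st.1.set u.toNat (pvK v u : Int) ∧
      ((pvAStep v st u).2 = u ∨ (pvAStep v st u).2 = st.2) := by
  have hread : ∀ x : Int, 0 ≤ x →
      PySem.List.pyGetD st.1 x 0 = if 1 ≤ x ∧ x < u then (pvK v x : Int) else 0 := by
    intro x hx
    have hxx : x = ((x.toNat : Nat) : Int) := by omega
    rw [hxx, PySem.List.pyGetD_natCast, hent x.toNat, ← hxx]
  have hKu : (pvK v u : Int) ≤ u := hsent u hu1 hu2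
  have hexpand0 : pvExpand v u (v.length + 1) 0 = (pvK v u : Int) := by
    have h := pvExpand_eq v u hu1 (v.length + 1) 0 (by omega) (by omega)
    simpa using h
  simp only [pvAStep]
  rcases hp with h0 | hpu
  · rw [h0, hread 0 le_rfl, if_neg (by omega)]
    rw [hread u (by omega), if_neg (by omega)]
    rw [hexpand0]
    rw [PySem.List.pySetD_of_nonneg _ _ (by omega)]
    refine ⟨rfl, ?_⟩
    by_cases hC : u + PySem.List.pyGetD (st.1.set u.toNat (pvK v u : Int)) u 0 >
        0 + PySem.List.pyGetD (st.1.set u.toNat (pvK v u : Int)) 0 0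
    · rw [if_pos hC]; left; rfl
    · rw [if_neg hC]; right; rfl
  · have hKp : (pvK v st.2 : Int) ≤ st.2 := hsent st.2 hpu.1 (by omega)
    rw [hread st.2 (by omega), if_pos (show 1 ≤ st.2 ∧ st.2 < u from ⟨hpu.1, hpu.2⟩)]
    by_cases hcond : st.2 + (pvK v st.2 : Int) > u
    · rw [if_pos hcond]
      rw [show st.2 - (u - st.2) = 2 * st.2 - u from by ring]
      rw [hread (2 * st.2 - u) (by omega), if_pos (show 1 ≤ 2 * st.2 - u ∧ 2 * st.2 - u < u from ⟨by omega, by omega⟩)]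
      have hm00 : (0:Int) ≤ min (st.2 + (pvK v st.2 : Int) - u) (pvK v (2 * st.2 - u) : Int) := by
        have h1 : (0:Int) < st.2 + (pvK v st.2 : Int) - u := by omega
        have h2 : (0:Int) ≤ (pvK v (2 * st.2 - u) : Int) := by positivity
        omega
      have hrb : PySem.List.pyGetD
          (PySem.List.pySetD st.1 u (min (st.2 + (pvK v st.2 : Int) - u) (pvK v (2 * st.2 - u) : Int))) u 0
          = min (st.2 + (pvK v st.2 : Int) - u) (pvK v (2 * st.2 - u) : Int) := by
        rw [PySem.List.pySetD_of_nonneg _ _ (by omega)]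
        have hxx : u = ((u.toNat : Nat) : Int) := by omega
        rw [hxx, PySem.List.pyGetD_natCast]
        exact pvGetD_set_self _ _ _ (by omega)
      rw [hrb]
      have hex : pvExpand v u (v.length + 1)
          (min (st.2 + (pvK v st.2 : Int) - u) (pvK v (2 * st.2 - u) : Int)) = (pvK v u : Int) := by
        have hxx : min (st.2 + (pvK v st.2 : Int) - u) (pvK v (2 * st.2 - u) : Int)
            = (((min (st.2 + (pvK v st.2 : Int) - u) (pvK v (2 * st.2 - u) : Int)).toNat : Nat) : Int) := by
          omega
        rw [hxx]
        apply pvExpand_eq v u hu1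
        · intro k hk
          have hk' : (k : Int) < min (st.2 + (pvK v st.2 : Int) - u) (pvK v (2 * st.2 - u) : Int) := by
            omega
          exact pvMirror v st.2 u hpu.1 hpu.2 (by omega) hKp k (by omega) (by omega)
        · omega
      rw [hex]
      rw [PySem.List.pySetD_of_nonneg st.1 _ (by omega)]
      rw [PySem.List.pySetD_of_nonneg _ _ (by omega)]
      rw [List.set_set]
      refine ⟨rfl, ?_⟩
      by_cases hC : u + PySem.List.pyGetD (st.1.set u.toNat (pvK v u : Int)) u 0 >
          st.2 + PySem.List.pyGetD (st.1.set u.toNat (pvK v u : Int)) st.2 0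
      · rw [if_pos hC]; left; rfl
      · rw [if_neg hC]; right; rfl
    · rw [if_neg hcond]
      rw [hread u (by omega), if_neg (by omega)]
      rw [hexpand0]
      rw [PySem.List.pySetD_of_nonneg _ _ (by omega)]
      refine ⟨rfl, ?_⟩
      by_cases hC : u + PySem.List.pyGetD (st.1.set u.toNat (pvK v u : Int)) u 0 >
          st.2 + PySem.List.pyGetD (st.1.set u.toNat (pvK v u : Int)) st.2 0
      · rw [if_pos hC]; left; rfl
      · rw [if_neg hC]; right; rfl

def pvInvA (v : List Int) (u : Int) (st : List Int × Int) : Prop :=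
  st.1.length = v.length ∧
  (∀ j : Nat, st.1.getD j 0 =
    if 1 ≤ (j : Int) ∧ (j : Int) < u then (pvK v (j : Int) : Int) else 0) ∧
  (st.2 = 0 ∨ (1 ≤ st.2 ∧ st.2 < u))

theorem pvInvA_step (v : List Int)
    (hsent : ∀ jj : Int, 1 ≤ jj → jj ≤ (v.length : Int) - 2 → (pvK v jj : Int) ≤ jj)
    (u : Int) (st : List Int × Int) (hu1 : 1 ≤ u) (hu2 : u ≤ (v.length : Int) - 2)
    (h : pvInvA v u st) : pvInvA v (u + 1) (pvAStep v st u) := by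
  obtain ⟨hlen, hent, hp⟩ := h
  obtain ⟨h1, h2⟩ := pvAStep_key v hsent u st hu1 hu2 hlen hent hp
  refine ⟨?_, ?_, ?_⟩
  · rw [h1, List.length_set, hlen]
  · intro j
    rw [h1]
    by_cases hj : j = u.toNat
    · subst hj
      rw [pvGetD_set_self _ _ _ (by omega)]
      rw [if_pos (show 1 ≤ ((u.toNat : Nat) : Int) ∧ ((u.toNat : Nat) : Int) < u + 1 from ⟨by omega, by omega⟩)]
      have hcast : ((u.toNat : Nat) : Int) = u := by omega
      rw [hcast]
    · rw [pvGetD_set_ne _ _ _ _ (fun hh => hj hh.symm)]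
      rw [hent j]
      by_cases hcl : 1 ≤ (j : Int) ∧ (j : Int) < u
      · rw [if_pos hcl, if_pos (show 1 ≤ (j : Int) ∧ (j : Int) < u + 1 from ⟨hcl.1, by omega⟩)]
      · rw [if_neg hcl, if_neg (fun hc => hcl ⟨hc.1, by omega⟩)]
  · rcases h2 with h2 | h2 <;> rw [h2]
    · right; exact ⟨hu1, by omega⟩
    · rcases hp with h3 | h3
      · left; exact h3
      · right; exact ⟨h3.1, by omega⟩

theorem pvFoldA (v : List Int)
    (hsent : ∀ jj : Int, 1 ≤ jj → jj ≤ (v.length : Int) - 2 → (pvK v jj : Int) ≤ jj) :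
    ∀ u : Int, 1 ≤ u → u ≤ (v.length : Int) - 1 →
      pvInvA v u ((PySem.List.pyRange 1 u).foldl (pvAStep v)
        (List.replicate v.length (0 : Int), 0)) := by
  have key : ∀ u : Int, 1 ≤ u → (u ≤ (v.length : Int) - 1 →
      pvInvA v u ((PySem.List.pyRange 1 u).foldl (pvAStep v)
        (List.replicate v.length (0 : Int), 0))) := by
    intro u hu
    induction u, hu using Int.le_induction with
    | base =>
      intro _
      rw [PySem.List.pyRange_one_eq_nil (le_refl 1), List.foldl_nil]
      refine ⟨by simp, ?_, Or.inl rfl⟩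
      intro j
      rw [if_neg (by omega)]
      simp [List.getD_eq_getElem?_getD, List.getElem?_replicate]
      split <;> rfl
    | succ w hw ih =>
      intro hle
      rw [PySem.List.pyRange_one_succ_right (by omega), List.foldl_append, List.foldl_cons,
        List.foldl_nil]
      exact pvInvA_step v hsent w _ hw (by omega) (ih (by omega))
  exact fun u h1 h2 => key u h1 h2

-- ===== new lemmas for the B port =====

-- the adjusted radius, as a function of the input only (proof-side)
noncomputable def pvAdj (v : List Int) (i : Int) : Int :=
  (pvK v i : Int) - PySem.Int.bxor (PySem.Int.band (pvK v i : Int) 1)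
    (if PySem.List.pyGetD v i 0 ≠ 0 then 1 else 0)

-- the three difference-array bumps for center i with radius r (proof-side)
def pvBump (d : List Int) (i r : Int) : List Int :=
  let d := PySem.List.pySetD d (i - r) (PySem.List.pyGetD d (i - r) 0 + 1)
  let d := PySem.List.pySetD d (i + 1) (PySem.List.pyGetD d (i + 1) 0 - 2)
  PySem.List.pySetD d (i + r + 2) (PySem.List.pyGetD d (i + r + 2) 0 + 1)

-- explicit running-sum list (proof-side model of B's append loop)
def pvCums' : List Int → Int → List Int
  | [], _ => []
  | x :: xs, s => (s + x) :: pvCums' xs (s + x)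

theorem pvFlat_length (a : List Int) (nn : Nat) :
    ((PySem.List.pyRange 0 (nn : Int) 1).flatMap
      (fun i => [PySem.List.pyGetD a i 0, 0])).length = 2 * nn := by
  induction nn with
  | zero => rw [PySem.List.pyRange_one_eq_nil (by omega)]; rfl
  | succ m ih =>
    have hc : ((m + 1 : Nat) : Int) = (m : Int) + 1 := by push_cast; ring
    rw [hc, PySem.List.pyRange_one_succ_right (by omega), List.flatMap_append,
      List.length_append, ih]
    simp; omega

theorem pvFlat_getD (a : List Int) (nn k : Nat) (hk : k < 2 * nn) :
    ((PySem.List.pyRange 0 (nn : Int) 1).flatMap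
      (fun i => [PySem.List.pyGetD a i 0, 0])).getD k 0
      = if k % 2 = 0 then PySem.List.pyGetD a ((k / 2 : Nat) : Int) 0 else 0 := by
  induction nn with
  | zero => omega
  | succ m ih =>
    have hc : ((m + 1 : Nat) : Int) = (m : Int) + 1 := by push_cast; ring
    rw [hc, PySem.List.pyRange_one_succ_right (by omega), List.flatMap_append]
    by_cases hlt : k < 2 * m
    · rw [List.getD_append _ _ _ _ (by rw [pvFlat_length]; exact hlt)]
      exact ih hlt
    · rw [List.getD_append_right _ _ _ _ (by rw [pvFlat_length]; omega)]
      rw [pvFlat_length]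
      have hk2 : k = 2 * m ∨ k = 2 * m + 1 := by omega
      rcases hk2 with rfl | rfl
      · rw [if_pos (by omega), Nat.mul_div_cancel_left m (by omega)]
        have h00 : 2 * m - 2 * m = 0 := by omega
        rw [h00]
        rfl
      · rw [if_neg (by omega)]
        have : 2 * m + 1 - 2 * m = 1 := by omega
        simp [this]

theorem pvVB_length (n : Int) (a : List Int) (hn : 0 ≤ n) :
    (pvVB n a).length = (2 * n + 1).toNat := by
  rw [pvVB]
  simp only [PySem.List.length_pySetD, List.length_cons]
  have : (n : Int) = ((n.toNat : Nat) : Int) := by omega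
  rw [this, pvFlat_length]
  omega

theorem pvVB_eq (n : Int) (a : List Int) (hn : 0 ≤ n) :
    pvVB n a = pvBuildV n a := by
  rcases eq_or_lt_of_le hn with h0 | h1
  · rw [pvVB, pvBuildV, ← h0]
    rw [PySem.List.pyRange_one_eq_nil (by omega)]
    simp [PySem.List.pySetD_of_nonneg]
  · -- n ≥ 1
    have hnn : (n : Int) = ((n.toNat : Nat) : Int) := by omega
    apply List.ext_getElem
    · rw [pvVB_length n a hn, pvBuildV_length]
    · intro j hj1 hj2
      rw [← List.getD_eq_getElem _ 0 hj1, ← List.getD_eq_getElem _ 0 hj2]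
      have hjlt : j < (2 * n + 1).toNat := by rw [← pvBuildV_length n a]; exact hj2
      rw [pvVB]
      rw [PySem.List.pySetD_of_nonneg _ _ (by omega : (0:Int) ≤ 2 * n)]
      by_cases hj2n : (j : Int) = 2 * n
      · -- j = 2n (even): both sides are -1
        rw [show (2 * n).toNat = j from by omega]
        rw [pvGetD_set_self _ _ _ (by
          simp only [List.length_cons]
          rw [hnn, pvFlat_length]; omega)]
        rw [pvBuildV_even n a (by omega) j (by omega)]
        rw [if_neg (by omega), if_pos hj2n]
      · rw [pvGetD_set_ne _ _ _ _ (by omega)]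
        rcases Nat.even_or_odd j with he | ho
        · -- j even, j ≠ 2n
          have hj2' : j % 2 = 0 := Nat.even_iff.mp he
          rw [pvBuildV_even n a (by omega) j hj2']
          by_cases hj0 : j = 0
          · subst hj0; simp
          · rw [if_neg hj0, if_neg hj2n]
            obtain ⟨k, hk⟩ : ∃ k, j = k + 1 := ⟨j - 1, by omega⟩
            subst hk
            rw [List.getD_cons_succ]
            rw [hnn, pvFlat_getD a n.toNat k (by omega)]
            rw [if_neg (by omega)]
        · -- j odd: j = 2*i0+1
          have hj2' : j % 2 = 1 := Nat.odd_iff.mp ho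
          obtain ⟨i0, hi0⟩ : ∃ i0, j = 2 * i0 + 1 := ⟨j / 2, by omega⟩
          subst hi0
          rw [pvBuildV_odd n a hn i0 (by omega)]
          rw [List.getD_cons_succ]
          rw [hnn, pvFlat_getD a n.toNat (2 * i0) (by omega)]
          rw [if_pos (by omega)]
          rw [Nat.mul_div_cancel_left i0 (by omega)]

-- named forms of the loop bodies (definitionally equal to the lambdas in the ports)
def pvSStep (v : List Int) (st : List Int × List Int) (i : Int) : List Int × List Int :=
  let r := PySem.List.pyGetD st.1 i 0 -
    PySem.Int.bxor (PySem.Int.band (PySem.List.pyGetD st.1 i 0) 1)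
      (if PySem.List.pyGetD v i 0 ≠ 0 then 1 else 0)
  (PySem.List.pySetD st.1 i r, pvBump st.2 i r)

def pvCumStep (pre : List Int) (i : Int) : List Int :=
  PySem.List.pySetD pre i (PySem.List.pyGetD pre i 0 + PySem.List.pyGetD pre (i - 1) 0)

def pvHalfStep (pre : List Int) (i : Int) : List Int :=
  PySem.List.pySetD pre i ((PySem.List.pyGetD pre i 0 : Int) >>> (1:Nat))

theorem pvPost_view (v ra0 : List Int) :
    pvPost v ra0 =
      (let N : Int := (v.length : Int)
       let d := ((PySem.List.pyRange 1 (N - 1) 1).foldl (pvSStep v)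
         (ra0, List.replicate (N + 2).toNat (0 : Int))).2
       let p1 := (PySem.List.pyRange 1 N 1).foldl pvCumStep d
       let p2 := (PySem.List.pyRange 1 N 1).foldl pvCumStep p1
       let ph := (PySem.List.pyRange 0 N 1).foldl pvHalfStep p2
       (PySem.List.pyRange 1 (N - 1) 1).foldl
         (fun ans i => PySem.Int.mod
           (ans + PySem.List.pyGetD ph i 0 * PySem.List.pyGetD v i 0) 1000000007) 0) := rfl

theorem pvDiff_view (m : Int) (rad : List Int) :
    pvDiff m rad = (PySem.List.pyRange 1 (m - 1) 1).foldl
      (fun d i => pvBump d i (PySem.List.pyGetD rad i 0))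
      (List.replicate (m + 2).toNat (0 : Int)) := rfl

theorem pvGetD_toNat (w : List Int) (x : Int) (hx : 0 ≤ x) :
    PySem.List.pyGetD w x 0 = w.getD x.toNat 0 := by
  rw [show x = ((x.toNat : Nat) : Int) from by omega, PySem.List.pyGetD_natCast]
  simp only [List.getD_eq_getElem?_getD]
  rw [show (((x.toNat : Nat) : Int)).toNat = x.toNat from by omega]

theorem pvFoldLen (step : List Int → Int → List Int)
    (h : ∀ w x, (step w x).length = w.length) :
    ∀ (l : List Int) (w : List Int), (l.foldl step w).length = w.length := by
  intro l
  induction l with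
  | nil => intro w; rfl
  | cons x xs ih => intro w; rw [List.foldl_cons, ih, h]

theorem pvBump_length (d : List Int) (i r : Int) : (pvBump d i r).length = d.length := by
  simp [pvBump, PySem.List.length_pySetD]

theorem pvCumStep_length (w : List Int) (i : Int) : (pvCumStep w i).length = w.length := by
  simp [pvCumStep, PySem.List.length_pySetD]

theorem pvHalfStep_length (w : List Int) (i : Int) : (pvHalfStep w i).length = w.length := by
  simp [pvHalfStep, PySem.List.length_pySetD]

-- in-place prefix-sum pass: entry characterization
theorem pvCumFold_getD (w : List Int) (M : Int) (hM : 1 ≤ M) :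
    M ≤ (w.length : Int) → ∀ j : Nat,
      ((PySem.List.pyRange 1 M 1).foldl pvCumStep w).getD j 0 =
        if (j : Int) < M then (w.take (j + 1)).sum else w.getD j 0 := by
  induction M, hM using Int.le_induction with
  | base =>
    intro hlen j
    rw [PySem.List.pyRange_one_eq_nil (le_refl 1), List.foldl_nil]
    by_cases hj : (j : Int) < 1
    · rw [if_pos hj]
      have hj0 : j = 0 := by omega
      subst hj0
      cases w with
      | nil => simp at hlen
      | cons x xs => simp
    · rw [if_neg hj]
  | succ M hM1 ih =>
    intro hlen j
    rw [PySem.List.pyRange_one_succ_right (by omega), List.foldl_append, List.foldl_cons,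
      List.foldl_nil]
    have hlen' : ((PySem.List.pyRange 1 M 1).foldl pvCumStep w).length = w.length :=
      pvFoldLen pvCumStep pvCumStep_length _ w
    have hMw : M.toNat < w.length := by omega
    rw [pvCumStep]
    rw [pvGetD_toNat _ M (by omega), pvGetD_toNat _ (M - 1) (by omega)]
    rw [ih (by omega) M.toNat, ih (by omega) (M - 1).toNat]
    rw [if_neg (by omega), if_pos (by omega)]
    have htake : ((M - 1).toNat + 1) = M.toNat := by omega
    rw [htake]
    rw [PySem.List.pySetD_of_nonneg _ _ (by omega : (0:Int) ≤ M)]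
    by_cases hj : j = M.toNat
    · subst hj
      rw [pvGetD_set_self _ _ _ (by rw [hlen']; exact hMw)]
      rw [if_pos (by omega)]
      rw [List.sum_take_succ w M.toNat hMw]
      rw [List.getD_eq_getElem w 0 hMw]
      ring
    · rw [pvGetD_set_ne _ _ _ _ (fun hh => hj hh.symm)]
      rw [ih (by omega) j]
      by_cases hcl : (j : Int) < M
      · rw [if_pos hcl, if_pos (by omega)]
      · rw [if_neg hcl, if_neg (by omega)]

-- in-place halving pass: entry characterization
theorem pvHalfFold_getD (w : List Int) (M : Int) (hM : 0 ≤ M) :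
    M ≤ (w.length : Int) → ∀ j : Nat,
      ((PySem.List.pyRange 0 M 1).foldl pvHalfStep w).getD j 0 =
        if (j : Int) < M then (w.getD j 0) >>> (1:Nat) else w.getD j 0 := by
  induction M, hM using Int.le_induction with
  | base =>
    intro _ j
    rw [PySem.List.pyRange_one_eq_nil (le_refl 0), List.foldl_nil, if_neg (by omega)]
  | succ M hM0 ih =>
    intro hlen j
    rw [PySem.List.pyRange_one_succ_right (by omega), List.foldl_append, List.foldl_cons,
      List.foldl_nil]
    have hlen' : ((PySem.List.pyRange 0 M 1).foldl pvHalfStep w).length = w.length :=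
      pvFoldLen pvHalfStep pvHalfStep_length _ w
    have hMw : M.toNat < w.length := by omega
    rw [pvHalfStep]
    rw [pvGetD_toNat _ M (by omega)]
    rw [ih (by omega) M.toNat, if_neg (by omega)]
    rw [PySem.List.pySetD_of_nonneg _ _ (by omega : (0:Int) ≤ M)]
    by_cases hj : j = M.toNat
    · subst hj
      rw [pvGetD_set_self _ _ _ (by rw [hlen']; exact hMw)]
      rw [if_pos (by omega)]
    · rw [pvGetD_set_ne _ _ _ _ (fun hh => hj hh.symm)]
      rw [ih (by omega) j]
      by_cases hcl : (j : Int) < M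
      · rw [if_pos hcl, if_pos (by omega)]
      · rw [if_neg hcl, if_neg (by omega)]

-- B's running-sum loop: characterization
theorem pvCums_fold_acc (xs : List Int) :
    ∀ (acc : List Int) (s : Int),
      (xs.foldl (fun (st : List Int × Int) x => (st.1 ++ [st.2 + x], st.2 + x)) (acc, s)).1
        = acc ++ pvCums' xs s := by
  induction xs with
  | nil => intro acc s; simp [pvCums']
  | cons x xs ih =>
    intro acc s
    rw [List.foldl_cons, ih, pvCums', List.append_assoc, List.singleton_append]

theorem pvCums_eq (xs : List Int) : pvCums xs = pvCums' xs 0 := by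
  rw [pvCums, pvCums_fold_acc, List.nil_append]

theorem pvCums'_length (xs : List Int) : ∀ s : Int, (pvCums' xs s).length = xs.length := by
  induction xs with
  | nil => intro s; rfl
  | cons x xs ih => intro s; rw [pvCums', List.length_cons, List.length_cons, ih]

theorem pvCums'_getD (xs : List Int) :
    ∀ (s : Int) (j : Nat), j < xs.length →
      (pvCums' xs s).getD j 0 = s + (xs.take (j + 1)).sum := by
  induction xs with
  | nil => intro s j hj; simp at hj
  | cons x xs ih =>
    intro s j hj
    cases j with
    | zero => simp [pvCums']
    | succ j =>
      rw [pvCums', List.getD_cons_succ, ih (s + x) j (by simpa using hj)]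
      simp
      ring

-- mod-at-every-step fold is the mod of the sum
theorem pvFoldMod_aux (M : Int) (hM : 0 < M) (f : Int → Int) :
    ∀ (l : List Int) (z : Int),
      l.foldl (fun ans i => PySem.Int.mod (ans + f i) M) (PySem.Int.mod z M)
        = PySem.Int.mod (z + (l.map f).sum) M := by
  intro l
  induction l with
  | nil => intro z; simp
  | cons x xs ih =>
    intro z
    rw [List.foldl_cons]
    have hstep : PySem.Int.mod (PySem.Int.mod z M + f x) M = PySem.Int.mod (z + f x) M := by
      rw [PySem.Int.mod_eq_emod_of_pos hM, PySem.Int.mod_eq_emod_of_pos hM,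
        PySem.Int.mod_eq_emod_of_pos hM]
      conv_lhs => rw [Int.emod_def z M]
      rw [show z - M * (z / M) + f x = z + f x + M * (-(z / M)) from by ring]
      rw [Int.add_mul_emod_self_left]
    rw [hstep, ih (z + f x)]
    rw [List.map_cons, List.sum_cons]
    ring_nf

theorem pvFoldMod (M : Int) (hM : 0 < M) (f : Int → Int) (l : List Int) :
    l.foldl (fun ans i => PySem.Int.mod (ans + f i) M) 0
      = PySem.Int.mod ((l.map f).sum) M := by
  have h0 : (0 : Int) = PySem.Int.mod 0 M := by
    rw [PySem.Int.mod_eq_emod_of_pos hM]; simp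
  rw [h0, pvFoldMod_aux M hM f l 0]
  rw [zero_add]

theorem pvRad_getD (v : List Int) (i : Int) (h1 : 1 ≤ i) (h2 : i < (v.length : Int) - 1) :
    PySem.List.pyGetD (pvRad v) i 0 = pvAdj v i := by
  rw [pvRad]
  simp only [PySem.List.len_eq]
  rw [PySem.List.pyGetD_map_pyRange_of_nonneg _ _ _ _ (by omega) (by omega)]
  rw [if_pos ⟨by omega, h2⟩]
  rw [pvRadius, pvGrow_zero_eq_pvK v i h1, pvAdj]

theorem pvDiff_eq (v : List Int) :
    pvDiff ((v.length : Int)) (pvRad v)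
      = (PySem.List.pyRange 1 ((v.length : Int) - 1) 1).foldl
          (fun d i => pvBump d i (pvAdj v i))
          (List.replicate (((v.length : Int)) + 2).toNat (0 : Int)) := by
  rw [pvDiff_view]
  apply PySem.List.foldl_congr_mem
  intro acc x hx
  obtain ⟨hx1, hx2⟩ := PySem.List.mem_pyRange_one.mp hx
  rw [pvRad_getD v x hx1 hx2]

theorem pvStage1 (v ra0 d0 : List Int)
    (hra : ∀ j : Nat, ra0.getD j 0 =
      if 1 ≤ (j : Int) ∧ (j : Int) < (v.length : Int) - 1 then (pvK v (j : Int) : Int) else 0) :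
    ∀ u : Int, 1 ≤ u → u ≤ (v.length : Int) - 1 →
      (∀ j : Nat, u ≤ (j : Int) →
        ((PySem.List.pyRange 1 u 1).foldl (pvSStep v) (ra0, d0)).1.getD j 0 = ra0.getD j 0) ∧
      ((PySem.List.pyRange 1 u 1).foldl (pvSStep v) (ra0, d0)).2
        = (PySem.List.pyRange 1 u 1).foldl (fun d i => pvBump d i (pvAdj v i)) d0 := by
  intro u hu
  induction u, hu using Int.le_induction with
  | base =>
    intro _
    rw [PySem.List.pyRange_one_eq_nil (le_refl 1)]
    exact ⟨fun j _ => rfl, rfl⟩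
  | succ w hw ih =>
    intro hle
    obtain ⟨ih1, ih2⟩ := ih (by omega)
    rw [PySem.List.pyRange_one_succ_right (by omega), List.foldl_append, List.foldl_cons,
      List.foldl_nil, List.foldl_append, List.foldl_cons, List.foldl_nil]
    have hc : ((w.toNat : Nat) : Int) = w := by omega
    have hr : PySem.List.pyGetD
        ((PySem.List.pyRange 1 w 1).foldl (pvSStep v) (ra0, d0)).1 w 0 = (pvK v w : Int) := by
      rw [pvGetD_toNat _ w (by omega), ih1 w.toNat (by omega), hra w.toNat, hc,
        if_pos ⟨hw, by omega⟩]
    constructor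
    · intro j hj
      simp only [pvSStep]
      rw [PySem.List.pySetD_of_nonneg _ _ (by omega : (0:Int) ≤ w)]
      rw [pvGetD_set_ne _ _ _ _ (by omega)]
      exact ih1 j (by omega)
    · simp only [pvSStep, hr, ih2]
      rfl

theorem pvP1_take_eq (D : List Int) (m : Int) (hm1 : 1 ≤ m)
    (hD : (D.length : Int) = m + 2) (k : Nat) (hk : k ≤ m.toNat) :
    ((PySem.List.pyRange 1 m 1).foldl pvCumStep D).take k
      = (pvCums' (D.take m.toNat) 0).take k := by
  have hfl : ((PySem.List.pyRange 1 m 1).foldl pvCumStep D).length = D.length :=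
    pvFoldLen pvCumStep pvCumStep_length _ D
  have hcl : (pvCums' (D.take m.toNat) 0).length = m.toNat := by
    rw [pvCums'_length, List.length_take]; omega
  apply List.ext_getElem
  · rw [List.length_take, List.length_take, hfl, hcl]; omega
  · intro t ht1 ht2
    have htk : t < k := by rw [List.length_take] at ht1; omega
    rw [List.getElem_take, List.getElem_take]
    rw [← List.getD_eq_getElem _ 0, ← List.getD_eq_getElem _ 0]
    rw [pvCumFold_getD D m hm1 (by omega) t]
    rw [if_pos (by omega)]
    rw [pvCums'_getD _ 0 t (by rw [List.length_take]; omega)]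
    rw [List.take_take, show min (t + 1) m.toNat = t + 1 from by omega, zero_add]

theorem pvZero (a : List Int) : solve 0 a = solve_alt 0 a := by
  have hA : solve 0 a = 0 := by
    have hlen : (((pvBuildV 0 a).length : Nat) : Int) = 1 := by
      rw [pvBuildV_length]; rfl
    simp only [solve, pvPost_view, hlen]
    rw [show (1:Int) - 1 = 0 from by norm_num]
    rw [PySem.List.pyRange_one_eq_nil (by omega : (0:Int) ≤ 1)]
    rfl
  have hB : solve_alt 0 a = 0 := by
    have hlen : (((pvVB 0 a).length : Nat) : Int) = 1 := by
      rw [pvVB_length 0 a (by omega)]; rfl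
    simp only [solve_alt, PySem.List.len_eq, hlen]
    rw [show (1:Int) - 1 = 0 from by norm_num]
    rw [PySem.List.pyRange_one_eq_nil (by omega : (0:Int) ≤ 1)]
    simp [PySem.Int.mod]
  rw [hA, hB]

theorem pvMain1 (n : Int) (a : List Int) (hn1 : 1 ≤ n) : solve n a = solve_alt n a := by
  have hvlen : (pvBuildV n a).length = (2 * n + 1).toNat := pvBuildV_length n a
  have hsent : ∀ jj : Int, 1 ≤ jj → jj ≤ ((pvBuildV n a).length : Int) - 2 →
      (pvK (pvBuildV n a) jj : Int) ≤ jj := by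
    intro jj h1 h2
    exact pvK_le_self n a hn1 jj h1 (by omega)
  have hvlen' : ((pvBuildV n a).length : Int) = 2 * n + 1 := by omega
  simp only [solve, solve_alt, PySem.List.len_eq]
  rw [pvVB_eq n a (by omega)]
  generalize hV : pvBuildV n a = v at hvlen' hsent ⊢
  have hm3 : (3:Int) ≤ (v.length : Int) := by omega
  obtain ⟨hraLen, hraEnt, -⟩ := pvFoldA v hsent ((v.length : Int) - 1) (by omega) (by omega)
  have hra : ∀ j : Nat, (pvManacher v).getD j 0 =
      if 1 ≤ (j : Int) ∧ (j : Int) < (v.length : Int) - 1 then (pvK v (j : Int) : Int) else 0 := by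
    intro j
    rw [pvManacher]
    simp only [PySem.List.len_eq]
    exact hraEnt j
  obtain ⟨-, hd⟩ := pvStage1 v (pvManacher v)
    (List.replicate (((v.length : Int)) + 2).toNat (0 : Int)) hra
    ((v.length : Int) - 1) (by omega) (by omega)
  simp only [pvPost_view]
  rw [hd, pvDiff_eq v]
  rw [pvCums_eq, pvCums_eq]
  rw [PySem.List.slice_to _ (by omega : (0:Int) ≤ (v.length : Int))]
  set D := (PySem.List.pyRange 1 ((v.length : Int) - 1) 1).foldl
    (fun d i => pvBump d i (pvAdj v i))
    (List.replicate (((v.length : Int)) + 2).toNat (0 : Int)) with hDdef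
  have hDlen : (D.length : Int) = (v.length : Int) + 2 := by
    rw [hDdef, pvFoldLen (fun d i => pvBump d i (pvAdj v i))
      (fun w x => pvBump_length w x (pvAdj v x))]
    rw [List.length_replicate]; omega
  have hlp1A : (((PySem.List.pyRange 1 ((v.length : Int)) 1).foldl pvCumStep D).length : Int)
      = (v.length : Int) + 2 := by
    rw [pvFoldLen pvCumStep pvCumStep_length]; exact hDlen
  have hlp2A : (((PySem.List.pyRange 1 ((v.length : Int)) 1).foldl pvCumStep
      ((PySem.List.pyRange 1 ((v.length : Int)) 1).foldl pvCumStep D)).length : Int)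
      = (v.length : Int) + 2 := by
    rw [pvFoldLen pvCumStep pvCumStep_length]; exact hlp1A
  rw [pvFoldMod 1000000007 (by norm_num) _ _]
  congr 1
  refine congrArg List.sum (List.map_congr_left ?_)
  intro i hi
  obtain ⟨hi1, hi2⟩ := PySem.List.mem_pyRange_one.mp hi
  congr 1
  rw [pvGetD_toNat _ i (by omega), pvGetD_toNat _ i (by omega)]
  rw [pvHalfFold_getD _ ((v.length : Int)) (by omega) (by omega) i.toNat]
  rw [if_pos (by omega)]
  rw [pvCumFold_getD _ ((v.length : Int)) (by omega) (by omega) i.toNat]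
  rw [if_pos (by omega)]
  rw [pvCums'_getD _ 0 i.toNat (by
    rw [pvCums'_length, List.length_take]; omega)]
  rw [zero_add]
  rw [pvP1_take_eq D ((v.length : Int)) (by omega) hDlen (i.toNat + 1) (by omega)]


-- ===== VERDICT (by name: the statement is the Claim_ definition above) =====
theorem solve_spec : Claim_equal_solve := by
  intro n a _ hpre
  show solve n a = solve_alt n a
  rcases eq_or_lt_of_le hpre.1 with h0 | h1
  · rw [← h0]
    exact pvZero a
  · exact pvMain1 n a h1
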